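-- pv_equiv track=rewrite | github.com/analogpixel/adventOfCode2017 | day6/day6.py | redist
-- ===== SOURCE A (Python) =====
-- def redist(x):
-- 	count = max(x)
-- 	i = x.index(count)
-- 	x[i] = 0
-- 	i += 1
-- 	while count > 0:
-- 		if  i > len(x)-1:
-- 			i = 0
-- 		x[i] = x[i] + 1
-- 		count = count -1
-- 		i = i + 1
-- 	return x
-- ===== SOURCE B (Python) =====
-- def redist(x):
--     # Closed-form arithmetic redistribution instead of the unit-by-unit cyclic loop.
--     # Note: A mutates x in place; B leaves x untouched (return-value equivalence).
--     n = len(x)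
--     count = max(x)
--     i = x.index(count)
--     if count > 0:
--         q, r = divmod(count, n)
--     else:
--         q, r = 0, 0
--     return [(0 if j == i else x[j]) + q + (1 if (j - i - 1) % n < r else 0)
--             for j in range(n)]
-- ===== Notes on version B (the rewrite author's own statement) =====
-- stated objective: alternative
-- what changed: Replaces A's unit-by-unit while loop (one iteration per unit of the max value, cyclically incrementing slots) by a closed-form arithmetic distribution: each slot gets base = count//n plus one extra if it is among the first count%n slots after the max, computed in a single comprehension over range(n); A also mutates x in place while B builds a new list (return-value equivalence).
import Mathlib
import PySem

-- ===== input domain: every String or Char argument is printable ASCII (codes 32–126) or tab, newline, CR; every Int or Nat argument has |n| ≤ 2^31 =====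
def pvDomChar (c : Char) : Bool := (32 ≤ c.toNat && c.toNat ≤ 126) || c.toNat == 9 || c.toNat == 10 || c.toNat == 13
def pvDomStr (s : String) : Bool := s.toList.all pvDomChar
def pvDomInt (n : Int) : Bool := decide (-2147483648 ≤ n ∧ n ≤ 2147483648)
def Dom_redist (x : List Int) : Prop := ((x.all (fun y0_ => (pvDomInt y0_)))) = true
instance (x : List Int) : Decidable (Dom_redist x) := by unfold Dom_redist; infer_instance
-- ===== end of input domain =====

-- B replaces A's unit-by-unit cyclic distribution loop (one iteration per unit of the max)
-- by a closed-form arithmetic distribution (base = count//n plus 1 for the first count%n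
-- slots after the max); A mutates x in place, the equivalence is about the return value.

-- ===== PORT A =====
-- the while loop of A: state (count, i, x)
def redistLoop (c i : Int) (l : List Int) : List Int :=
  if c > 0 then
    let i' := if i > (l.length : Int) - 1 then 0 else i
    let l' := l.set i'.toNat (l.getD i'.toNat 0 + 1)
    redistLoop (c - 1) (i' + 1) l'
  else l
termination_by c.toNat
decreasing_by omega

def redist (x : List Int) : List Int :=
  match PySem.List.max? x (fun y => y) with
  | none => []        -- unreachable under Pre_ (Python: max([]) raises ValueError)
  | some count =>
    match PySem.List.index? x count with
    | none => []      -- unreachable: the max is in the list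
    | some i => redistLoop count ((i : Int) + 1) (x.set i 0)

-- ===== PORT B =====
def redist_alt (x : List Int) : List Int :=
  match PySem.List.max? x (fun y => y) with
  | none => []        -- unreachable under Pre_
  | some count =>
    match PySem.List.index? x count with
    | none => []
    | some i =>
      let n : Int := x.length
      let qr : Int × Int :=
        if count > 0 then (PySem.Int.floordiv count n, PySem.Int.mod count n) else (0, 0)
      (List.range x.length).map (fun j =>
        (if j = i then 0 else x.getD j 0) + qr.1 +
        (if PySem.Int.mod ((j : Int) - (i : Int) - 1) n < qr.2 then 1 else 0))

-- ===== PRECONDITION & SPEC =====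
-- Pre_ excludes only the empty list, on which Python's max([]) raises ValueError.
def Pre_redist (x : List Int) : Prop := x ≠ []
instance (x : List Int) : Decidable (Pre_redist x) := by unfold Pre_redist; infer_instance
def pvWitness_redist : List Int := [0, 2, 7, 0]

def Spec_redist (x : List Int) (out : List Int) : Prop := out = redist_alt x
instance (x : List Int) (out : List Int) : Decidable (Spec_redist x out) := by unfold Spec_redist; infer_instance

-- ===== CLAIM (what is proved, stated in full; the proofs are below) =====
def Claim_equal_redist : Prop := ∀ (x : List Int), Dom_redist x → Pre_redist x → Spec_redist x (redist x)

-- ===== LEMMAS AND PROOFS =====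

-- number of the c cyclic unit-drops starting at slot s that land on slot j (n slots)
def hits (c s j n : Nat) : Nat := (c + n - 1 - (j + n - s) % n) / n

lemma map_getD_range (l : List Int) :
    (List.range l.length).map (fun j => l.getD j 0) = l := by
  apply List.ext_getElem
  · simp
  · intro i h1 h2
    simp [List.getElem?_eq_getElem h2]

lemma mod_small (m n : Nat) (h : m < 2 * n) :
    m % n = if m < n then m else m - n := by
  split
  · exact Nat.mod_eq_of_lt ‹_›
  · rw [Nat.mod_eq_sub_mod (by omega)]; exact Nat.mod_eq_of_lt (by omega)

lemma hits_zero (s j n : Nat) (hn : 0 < n) : hits 0 s j n = 0 := by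
  have hd : (j + n - s) % n < n := Nat.mod_lt _ hn
  unfold hits
  exact Nat.div_eq_of_lt (by omega)

lemma hits_wrap (c j n : Nat) (hj : j < n) : hits c n j n = hits c 0 j n := by
  unfold hits
  rw [Nat.add_sub_cancel, Nat.mod_eq_of_lt hj, Nat.sub_zero, Nat.add_mod_right,
    Nat.mod_eq_of_lt hj]

lemma hits_succ (c s' j n : Nat) (hn : 0 < n) (hs'n : s' < n) (hj : j < n) :
    hits (c + 1) s' j n = hits c (s' + 1) j n + (if j = s' then 1 else 0) := by
  unfold hits
  rw [mod_small (j + n - s') n (by omega), mod_small (j + n - (s' + 1)) n (by omega)]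
  by_cases hje : j = s'
  · subst hje
    rw [if_pos rfl, if_neg (show ¬ j + n - j < n by omega),
      if_pos (show j + n - (j + 1) < n by omega)]
    have e1 : c + 1 + n - 1 - (j + n - j - n) = c + n := by omega
    have e2 : c + n - 1 - (j + n - (j + 1)) = c := by omega
    rw [e1, e2]
    exact Nat.add_div_right c hn
  · rw [if_neg hje]
    have hne : j + n - s' ≠ n := by omega
    have hnum : (c + 1 + n - 1 - if j + n - s' < n then j + n - s' else j + n - s' - n)
        = (c + n - 1 - if j + n - (s' + 1) < n then j + n - (s' + 1) else j + n - (s' + 1) - n) := by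
      split <;> split <;> omega
    rw [hnum]
    simp

-- elementwise description of A's while loop
lemma redistLoop_eq (c : Nat) : ∀ (s : Nat) (l : List Int), 0 < l.length → s ≤ l.length →
    redistLoop (c : Int) (s : Int) l =
      (List.range l.length).map (fun j => l.getD j 0 + (hits c s j l.length : Int)) := by
  induction c with
  | zero =>
    intro s l hn hs
    rw [redistLoop]
    simp only [Int.ofNat_zero, if_neg (by omega : ¬ (0:Int) > 0)]
    conv_lhs => rw [← map_getD_range l]
    apply List.map_congr_left
    intro j hj
    rw [hits_zero s j l.length hn]
    simp
  | succ c ih =>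
    intro s l hn hs
    set n := l.length with hnn
    set s' : Nat := if s = n then 0 else s with hs'
    have hs'n : s' < n := by rw [hs']; split <;> omega
    rw [redistLoop]
    rw [if_pos (by omega : ((c + 1 : Nat) : Int) > 0)]
    have hif : (if (s : Int) > (l.length : Int) - 1 then (0 : Int) else (s : Int)) = (s' : Int) := by
      rw [hs']
      split
      · rw [if_pos (by omega)]; simp
      · rw [if_neg (by omega)]
    simp only [hif, Int.toNat_natCast]
    have hlen' : (l.set s' (l.getD s' 0 + 1)).length = n := by simp [hnn]
    rw [show ((c + 1 : Nat) : Int) - 1 = ((c : Nat) : Int) by omega,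
      show ((s' : Nat) : Int) + 1 = ((s' + 1 : Nat) : Int) by omega,
      ih (s' + 1) _ (by omega) (by omega), hlen']
    apply List.map_congr_left
    intro j hj
    rw [List.mem_range] at hj
    have hget : (l.set s' (l.getD s' 0 + 1)).getD j 0
        = l.getD j 0 + (if j = s' then 1 else 0) := by
      by_cases hje : j = s'
      · subst hje
        rw [if_pos rfl, List.getD_eq_getElem _ 0 (by omega), List.getElem_set_self (by omega),
          List.getD_eq_getElem _ 0 (by omega)]
      · rw [if_neg hje, List.getD_eq_getElem _ 0 (by omega),
          List.getElem_set_ne (by omega) (by omega)]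
        simp [List.getD_eq_getElem?_getD, List.getElem?_eq_getElem (show j < l.length by omega)]
    have hstep : hits (c + 1) s j n = hits c (s' + 1) j n + (if j = s' then 1 else 0) := by
      rw [hs']
      by_cases h : s = n
      · subst h
        rw [if_pos rfl, hits_wrap (c + 1) j n hj]
        exact hits_succ c 0 j n hn (by omega) hj
      · rw [if_neg h]
        exact hits_succ c s j n hn (by omega) hj
    rw [hget, hstep]
    push_cast
    ring

-- closed form for hits
lemma hits_closed (c s j n : Nat) (hn : 0 < n) (hj : j < n) :
    hits c s j n = c / n + (if (j + n - s) % n < c % n then 1 else 0) := by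
  set d := (j + n - s) % n with hd
  have hdn : d < n := Nat.mod_lt _ hn
  have hrn : c % n < n := Nat.mod_lt _ hn
  have hc : n * (c / n) + c % n = c := Nat.div_add_mod c n
  unfold hits
  rw [← hd]
  have hnum : c + n - 1 - d = n * (c / n) + (c % n + n - 1 - d) := by omega
  rw [hnum, Nat.mul_add_div hn]
  congr 1
  split
  · have h1 : c % n + n - 1 - d = (c % n - 1 - d) + n := by omega
    rw [h1, Nat.add_div_right _ hn, Nat.div_eq_of_lt (by omega)]
  · exact Nat.div_eq_of_lt (by omega)

theorem redist_spec : Claim_equal_redist := by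
  intro x _ hpre
  unfold Spec_redist
  obtain ⟨count, hmax⟩ : ∃ c, PySem.List.max? x (fun y => y) = some c := by
    cases h : PySem.List.max? x (fun y => y) with
    | none => exact absurd ((PySem.List.max?_eq_none_iff x _).mp h) hpre
    | some c => exact ⟨c, rfl⟩
  have hmem : count ∈ x := PySem.List.max?_mem hmax
  obtain ⟨i, hidx⟩ : ∃ i, PySem.List.index? x count = some i := by
    cases h : PySem.List.index? x count with
    | none => exact absurd ((PySem.List.index?_eq_none_iff x count).mp h) (by simp [hmem])
    | some i => exact ⟨i, rfl⟩
  obtain ⟨hilen, -, -⟩ := PySem.List.getElem_of_index?_eq_some hidx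
  set n := x.length with hn
  have hn0 : 0 < n := by omega
  unfold redist redist_alt
  simp only [hmax, hidx]
  have hlen0 : (x.set i 0).length = n := by simp [hn]
  have hget0 : ∀ j, j < n → (x.set i 0).getD j 0 = (if j = i then 0 else x.getD j 0) := by
    intro j hj
    by_cases hje : j = i
    · subst hje
      rw [if_pos rfl, List.getD_eq_getElem _ 0 (by omega), List.getElem_set_self (by omega)]
    · rw [if_neg hje, List.getD_eq_getElem _ 0 (by omega),
        List.getElem_set_ne (by omega) (by omega)]
      simp [List.getD_eq_getElem?_getD, List.getElem?_eq_getElem (show j < x.length by omega)]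
  by_cases hcpos : count > 0
  · -- the loop runs: count.toNat unit drops starting at slot i+1
    obtain ⟨c, rfl⟩ : ∃ c : Nat, count = (c : Int) := ⟨count.toNat, by omega⟩
    rw [if_pos hcpos,
      show ((i : Int) + 1) = ((i + 1 : Nat) : Int) by push_cast; ring,
      redistLoop_eq c (i + 1) (x.set i 0) (by omega) (by omega), hlen0]
    apply List.map_congr_left
    intro j hj
    rw [List.mem_range] at hj
    have hmod : PySem.Int.mod ((j : Int) - (i : Int) - 1) (n : Int)
        = (((j + n - (i + 1)) % n : Nat) : Int) := by
      rw [PySem.Int.mod_eq_emod_of_pos (by omega)]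
      rw [show (j : Int) - (i : Int) - 1 = ((j + n - (i + 1) : Nat) : Int) - (n : Int) by
        push_cast [Nat.cast_sub (by omega : i + 1 ≤ j + n)]; ring]
      rw [Int.sub_emod_right, Int.natCast_mod]
    have hkey : ((hits c (i + 1) j n : Nat) : Int)
        = PySem.Int.floordiv (c : Int) (n : Int) +
          (if PySem.Int.mod ((j : Int) - (i : Int) - 1) (n : Int)
              < PySem.Int.mod (c : Int) (n : Int) then 1 else 0) := by
      rw [hmod, PySem.Int.floordiv_natCast, PySem.Int.mod_natCast,
        hits_closed c (i + 1) j n hn0 hj]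
      norm_cast
    rw [hget0 j hj, hkey]
    ring
  · -- count ≤ 0: the loop body never runs and B adds q = r = 0
    rw [redistLoop, if_neg hcpos, if_neg hcpos]
    conv_lhs => rw [← map_getD_range (x.set i 0)]
    rw [hlen0]
    apply List.map_congr_left
    intro j hj
    rw [List.mem_range] at hj
    rw [hget0 j hj]
    have hmnn : 0 ≤ PySem.Int.mod ((j : Int) - (i : Int) - 1) (x.length : Int) :=
      PySem.Int.mod_nonneg _ (by omega)
    simp [not_lt.mpr hmnn]
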